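-- pv_equiv track=rewrite | github.com/wbgoodwin/ts-from-gql | generate_ts.py | remove_queries_and_mutations
-- ===== SOURCE A (Python) =====
-- def line_indicates_query_or_mutation(split_line: list[str]):
--     return len(split_line) == 3 and (split_line[1] == "Query" or split_line[1] == "Mutation") and "{" in split_line[2]
--
-- def remove_queries_and_mutations(lines: list[str]):
--     updated_lines: list[str] = list()
--     in_query_or_mutation = False
--     for line in lines:
--         if in_query_or_mutation and "}" in line:
--             in_query_or_mutation = False
--         elif not in_query_or_mutation:
--             whitespace_split_str = line.split()
--             if line_indicates_query_or_mutation(whitespace_split_str):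
--                 in_query_or_mutation = True
--             else:
--                 updated_lines.append(line)
--     return updated_lines
-- ===== SOURCE B (Python) =====
-- def line_indicates_query_or_mutation(split_line: list[str]):
--     return len(split_line) == 3 and (split_line[1] == "Query" or split_line[1] == "Mutation") and "{" in split_line[2]
--
-- def _find_close(lines, n, close):
--     # index of the first line at or after `close` containing "}" (or n if none)
--     while close < n and "}" not in lines[close]:
--         close += 1
--     return close
--
-- def remove_queries_and_mutations(lines: list[str]):
--     # Stage 1: compute the inclusive index intervals covered by Query/Mutation blocks.
--     n = len(lines)
--     intervals = []
--     pos = 0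
--     while pos < n:
--         if line_indicates_query_or_mutation(lines[pos].split()):
--             close = _find_close(lines, n, pos + 1)
--             intervals.append((pos, close))
--             pos = close + 1
--         else:
--             pos += 1
--     # Stage 2: keep exactly the lines whose index lies in no removed interval.
--     return [line for i, line in enumerate(lines)
--             if not any(a <= i <= b for a, b in intervals)]
-- ===== Notes on version B (the rewrite author's own statement) =====
-- stated objective: alternative
-- what changed: Two staged passes instead of A's single pass with an in-block flag: first compute the inclusive index intervals of the Query/Mutation blocks, then filter the enumerated lines by interval membership.
import Mathlib
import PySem

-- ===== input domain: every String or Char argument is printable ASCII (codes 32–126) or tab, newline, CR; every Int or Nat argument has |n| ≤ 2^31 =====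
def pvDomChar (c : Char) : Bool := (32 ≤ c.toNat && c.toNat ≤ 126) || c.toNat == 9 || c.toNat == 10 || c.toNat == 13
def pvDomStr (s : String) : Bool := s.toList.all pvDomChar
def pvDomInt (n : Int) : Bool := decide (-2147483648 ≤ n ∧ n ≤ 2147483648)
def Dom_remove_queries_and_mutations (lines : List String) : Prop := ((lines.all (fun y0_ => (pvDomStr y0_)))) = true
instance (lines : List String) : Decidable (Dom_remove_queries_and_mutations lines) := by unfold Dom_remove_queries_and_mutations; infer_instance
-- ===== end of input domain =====

-- B replaces A's single pass with an in-block flag by two staged passes: first compute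
-- the inclusive index intervals of Query/Mutation blocks, then filter the enumerated
-- lines by interval membership (alternative decomposition, similar cost).


-- ===== PORT A =====
def line_indicates_query_or_mutation (split_line : List String) : Bool :=
  split_line.length == 3 &&
    (split_line.getD 1 "" == "Query" || split_line.getD 1 "" == "Mutation") &&
    PySem.Str.isIn "{" (split_line.getD 2 "")
    -- indexing via getD is exact here: the length == 3 guard puts 1 and 2 in range

def remove_queries_and_mutations (lines : List String) : List String :=
  (lines.foldl (fun (st : List String × Bool) line =>
      if st.2 && PySem.Str.isIn "}" line then (st.1, false)
      else if !st.2 then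
        if line_indicates_query_or_mutation (PySem.Str.split₀ line) then (st.1, true)
        else (st.1 ++ [line], st.2)
      else st)
    ([], false)).1

-- ===== PORT B =====
-- '_find_close': index of the first line at or after `close` containing "}" (or n)
def pvFindClose (lines : List String) (n : Nat) (close : Nat) : Nat :=
  if _h : close < n then
    if PySem.Str.isIn "}" (lines.getD close "") then close
    else pvFindClose lines n (close + 1)
  else close
termination_by n - close

-- lemma the port below needs for termination
theorem pvFindClose_ge (lines : List String) (n c : Nat) : c ≤ pvFindClose lines n c := by
  fun_induction pvFindClose <;> omega

-- Stage 1 while loop: the inclusive index intervals covered by Query/Mutation blocks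
def pvIntervals (lines : List String) (n : Nat) (pos : Nat) : List (Int × Int) :=
  if _h : pos < n then
    if line_indicates_query_or_mutation (PySem.Str.split₀ (lines.getD pos "")) then
      ((pos : Int), (pvFindClose lines n (pos + 1) : Int)) ::
        pvIntervals lines n (pvFindClose lines n (pos + 1) + 1)
    else pvIntervals lines n (pos + 1)
  else []
termination_by n - pos
decreasing_by
  · have := pvFindClose_ge lines n (pos + 1); omega
  · omega

def remove_queries_and_mutations_alt (lines : List String) : List String :=
  let intervals := pvIntervals lines lines.length 0
  ((PySem.List.enumerate lines).filter
      (fun p => !(intervals.any (fun ab => decide (ab.1 ≤ p.1) && decide (p.1 ≤ ab.2))))).map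
    (·.2)

-- ===== PRECONDITION & SPEC =====
def Spec_remove_queries_and_mutations (lines : List String) (out : List String) : Prop := out = remove_queries_and_mutations_alt lines
instance (lines : List String) (out : List String) : Decidable (Spec_remove_queries_and_mutations lines out) := by unfold Spec_remove_queries_and_mutations; infer_instance

-- ===== CLAIM (what is proved, stated in full; the proofs are below) =====
def Claim_equal_remove_queries_and_mutations : Prop := ∀ (lines : List String), Dom_remove_queries_and_mutations lines → Spec_remove_queries_and_mutations lines (remove_queries_and_mutations lines)

-- ===== LEMMAS AND PROOFS =====

-- common reference function: structural recursion skipping each block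
def pvSkipBlock : List String → List String
  | [] => []
  | l :: rest => if PySem.Str.isIn "}" l then rest else pvSkipBlock rest

theorem pvSkipBlock_length_le (xs : List String) : (pvSkipBlock xs).length ≤ xs.length := by
  induction xs with
  | nil => simp [pvSkipBlock]
  | cons l rest ih => simp only [pvSkipBlock]; split <;> simp <;> omega

def pvRemRec (lines : List String) : List String :=
  match lines with
  | [] => []
  | line :: rest =>
    if line_indicates_query_or_mutation (PySem.Str.split₀ line) then
      pvRemRec (pvSkipBlock rest)
    else
      line :: pvRemRec rest
termination_by lines.length
decreasing_by
  · exact Nat.lt_succ_of_le (pvSkipBlock_length_le rest)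
  · simp

-- ---- A equals pvRemRec ----
def pvStepA (st : List String × Bool) (line : String) : List String × Bool :=
  if st.2 && PySem.Str.isIn "}" line then (st.1, false)
  else if !st.2 then
    if line_indicates_query_or_mutation (PySem.Str.split₀ line) then (st.1, true)
    else (st.1 ++ [line], st.2)
  else st

theorem foldA_true (lines : List String) (acc : List String) :
    (lines.foldl pvStepA (acc, true)).1
      = (((pvSkipBlock lines).foldl pvStepA (acc, false)).1) := by
  induction lines generalizing acc with
  | nil => simp [pvSkipBlock]
  | cons l rest ih =>
    simp only [List.foldl_cons, pvStepA, pvSkipBlock]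
    by_cases h : PySem.Chars.isIn ['}'] l.toList = true
    · simp [h]
    · simp [h, ih]

theorem foldA_false (lines : List String) (acc : List String) :
    (lines.foldl pvStepA (acc, false)).1 = acc ++ pvRemRec lines := by
  induction lines using pvRemRec.induct generalizing acc with
  | case1 => simp [pvRemRec]
  | case2 line rest h ih =>
    rw [List.foldl_cons]
    have hstep : pvStepA (acc, false) line = (acc, true) := by simp [pvStepA, h]
    rw [hstep, foldA_true, ih]
    simp [pvRemRec, h]
  | case3 line rest h ih =>
    rw [List.foldl_cons]
    have hstep : pvStepA (acc, false) line = (acc ++ [line], false) := by simp [pvStepA, h]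
    rw [hstep, ih]
    simp [pvRemRec, h]

-- ---- B equals pvRemRec ----
def pvG (ivs : List (Int × Int)) (es : List (Int × String)) : List String :=
  (es.filter (fun p => !(ivs.any (fun ab => decide (ab.1 ≤ p.1) && decide (p.1 ≤ ab.2))))).map (·.2)

-- the element at j of '(enumerate lines).drop m' has index m + j
theorem enum_drop_idx_ge (lines : List String) (m : Nat) (p : Int × String)
    (hp : p ∈ (PySem.List.enumerate lines).drop m) : (m : Int) ≤ p.1 := by
  obtain ⟨j, hj, rfl⟩ := List.mem_iff_getElem.1 hp
  rw [List.getElem_drop, PySem.List.getElem_enumerate]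
  simp

theorem enum_drop_cons (lines : List String) (c : Nat) (hc : c < lines.length) :
    (PySem.List.enumerate lines).drop c
      = ((c : Int), lines.getD c "") :: (PySem.List.enumerate lines).drop (c + 1) := by
  have hlen : c < (PySem.List.enumerate lines).length := by
    simp [PySem.List.length_enumerate]; omega
  rw [List.drop_eq_getElem_cons hlen, PySem.List.getElem_enumerate]
  simp [List.getD, List.getElem?_eq_getElem hc]

-- a spent interval (b < m) never fires on the suffix from m
theorem pvG_spent (lines : List String) (a b : Int) (ivs : List (Int × Int)) (m : Nat)
    (hb : b < (m : Int)) :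
    pvG ((a, b) :: ivs) ((PySem.List.enumerate lines).drop m)
      = pvG ivs ((PySem.List.enumerate lines).drop m) := by
  unfold pvG
  rw [List.filter_congr]
  intro p hp
  have hge := enum_drop_idx_ge lines m p hp
  simp only [List.any_cons]
  have hnb : ¬ (p.1 ≤ b) := fun h => absurd (le_trans hge h) (not_le.mpr hb)
  simp [hnb]

-- the active head interval eats the whole segment c .. b
theorem pvG_eat (lines : List String) (a b : Int) (ivs : List (Int × Int)) (c : Nat)
    (ha : a ≤ (c : Int)) (hc : (c : Int) ≤ b + 1) :
    pvG ((a, b) :: ivs) ((PySem.List.enumerate lines).drop c)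
      = pvG ((a, b) :: ivs) ((PySem.List.enumerate lines).drop (b + 1).toNat) := by
  by_cases hstop : (c : Int) = b + 1
  · rw [show c = (b + 1).toNat by omega]
  · have hcb : (c : Int) ≤ b := by omega
    by_cases hn : c < lines.length
    · rw [enum_drop_cons lines c hn]
      have step : pvG ((a, b) :: ivs) (((c : Int), lines.getD c "") :: (PySem.List.enumerate lines).drop (c + 1))
          = pvG ((a, b) :: ivs) ((PySem.List.enumerate lines).drop (c + 1)) := by
        unfold pvG
        simp only [List.filter_cons]
        have : (((a, b) :: ivs).any (fun ab => decide (ab.1 ≤ (c : Int)) && decide ((c : Int) ≤ ab.2))) = true := by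
          simp only [List.any_cons]
          simp [ha, hcb]
        simp [this]
      rw [step]
      exact pvG_eat lines a b ivs (c + 1) (by push_cast; omega) (by push_cast; omega)
    · have h1 : (PySem.List.enumerate lines).drop c = [] := by
        apply List.drop_eq_nil_of_le; simp [PySem.List.length_enumerate]; omega
      have h2 : (PySem.List.enumerate lines).drop (b + 1).toNat = [] := by
        apply List.drop_eq_nil_of_le; simp [PySem.List.length_enumerate]; omega
      rw [h1, h2]
termination_by (b + 1 - (c : Int)).toNat
decreasing_by omega

-- every interval produced from pos starts at or after pos
theorem pvIntervals_lb (lines : List String) (n pos : Nat) (ab : Int × Int)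
    (hm : ab ∈ pvIntervals lines n pos) : (pos : Int) ≤ ab.1 := by
  fun_induction pvIntervals lines n pos with
  | case1 p hp hhdr ih =>
    rcases List.mem_cons.1 hm with h | h
    · subst h; simp
    · have := ih h
      have hcg := pvFindClose_ge lines n (p + 1)
      push_cast at this ⊢; omega
  | case2 p hp hhdr ih =>
    have := ih hm; push_cast at this ⊢; omega
  | case3 p hp => simp at hm

theorem skip_eq_drop_findClose (lines : List String) (c : Nat) :
    pvSkipBlock (lines.drop c) = lines.drop (pvFindClose lines lines.length c + 1) := by
  fun_induction pvFindClose lines lines.length c with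
  | case1 c hc hbrace =>
    have hg : lines.getD c "" = lines[c] := by simp [List.getD, List.getElem?_eq_getElem hc]
    rw [hg] at hbrace
    rw [List.drop_eq_getElem_cons hc]
    simp only [pvSkipBlock]
    rw [if_pos hbrace]
  | case2 c hc hbrace ih2 =>
    have hg : lines.getD c "" = lines[c] := by simp [List.getD, List.getElem?_eq_getElem hc]
    rw [hg] at hbrace
    rw [List.drop_eq_getElem_cons hc]
    simp only [pvSkipBlock]
    rw [if_neg hbrace, ih2]
  | case3 c hc =>
    have h1 : lines.drop c = [] := List.drop_eq_nil_of_le (by omega)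
    have h2 : lines.drop (c + 1) = [] := List.drop_eq_nil_of_le (by omega)
    rw [h1, h2]; rfl

theorem pvMain (lines : List String) (pos : Nat) :
    pvG (pvIntervals lines lines.length pos) ((PySem.List.enumerate lines).drop pos)
      = pvRemRec (lines.drop pos) := by
  fun_induction pvIntervals lines lines.length pos with
  | case1 p hp hhdr ih =>
    have hcg := pvFindClose_ge lines lines.length (p + 1)
    set cl := pvFindClose lines lines.length (p + 1) with hcl
    rw [pvG_eat lines (p : Int) (cl : Int) _ p (le_refl _) (by omega)]
    have htn : ((cl : Int) + 1).toNat = cl + 1 := by omega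
    rw [htn, pvG_spent lines _ _ _ (cl + 1) (by omega), ih]
    have hg : lines.getD p "" = lines[p] := by simp [List.getD, List.getElem?_eq_getElem hp]
    rw [hg] at hhdr
    rw [List.drop_eq_getElem_cons hp]
    simp only [pvRemRec, hhdr, if_true]
    rw [← skip_eq_drop_findClose lines (p + 1)]
  | case2 p hp hhdr ih =>
    have hg : lines.getD p "" = lines[p] := by simp [List.getD, List.getElem?_eq_getElem hp]
    rw [enum_drop_cons lines p hp, hg]
    have hkeep : pvG (pvIntervals lines lines.length (p + 1))
        (((p : Int), lines[p]) :: (PySem.List.enumerate lines).drop (p + 1))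
        = lines[p] :: pvG (pvIntervals lines lines.length (p + 1)) ((PySem.List.enumerate lines).drop (p + 1)) := by
      unfold pvG
      simp only [List.filter_cons]
      have hfalse : ((pvIntervals lines lines.length (p + 1)).any
          (fun ab => decide (ab.1 ≤ (p : Int)) && decide ((p : Int) ≤ ab.2))) = false := by
        rw [List.any_eq_false]
        intro ab hab
        have hlb := pvIntervals_lb lines lines.length (p + 1) ab hab
        push_cast at hlb
        have hnle : ¬ (ab.1 ≤ (p : Int)) := by omega
        simp [hnle]
      simp [hfalse]
    rw [hkeep, ih]
    rw [hg] at hhdr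
    rw [List.drop_eq_getElem_cons hp]
    simp only [pvRemRec]
    rw [if_neg hhdr]
  | case3 p hp =>
    have h1 : (PySem.List.enumerate lines).drop p = [] := by
      apply List.drop_eq_nil_of_le; simp [PySem.List.length_enumerate]; omega
    have h2 : lines.drop p = [] := List.drop_eq_nil_of_le (by omega)
    rw [h1, h2]; simp [pvG, pvRemRec]

-- ===== VERDICT (by name: the statement is the Claim_ definition above) =====
theorem remove_queries_and_mutations_spec : Claim_equal_remove_queries_and_mutations := by
  intro lines _
  show remove_queries_and_mutations lines = remove_queries_and_mutations_alt lines
  have hA : remove_queries_and_mutations lines = pvRemRec lines := foldA_false lines []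
  have hB : remove_queries_and_mutations_alt lines = pvRemRec lines := by
    have := pvMain lines 0
    simpa [remove_queries_and_mutations_alt, pvG] using this
  rw [hA, hB]
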